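-- pv_equiv track=rewrite | github.com/Ryder-MHumble/DeanAgent-Backend | scripts/data_import/import_all_universities_from_excel.py | parse_scholars
-- ===== SOURCE A (Python) =====
-- def parse_multiline_field(text: str | None) -> list[str]:
--     """解析多行文本字段"""
--     if not text:
--         return []
--     return [line.strip() for line in str(text).split('\n') if line.strip()]
--
-- def parse_scholars(names: str | None, titles: str | None, departments: str | None,
--                    research_areas: str | None) -> list[dict]:
--     """解析学者信息"""
--     name_list = parse_multiline_field(names)
--     title_list = parse_multiline_field(titles)
--     dept_list = parse_multiline_field(departments)
--     research_list = parse_multiline_field(research_areas)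
--
--     max_len = max(len(name_list), len(title_list), len(dept_list), len(research_list))
--     name_list += [''] * (max_len - len(name_list))
--     title_list += [''] * (max_len - len(title_list))
--     dept_list += [''] * (max_len - len(dept_list))
--     research_list += [''] * (max_len - len(research_list))
--
--     scholars = []
--     for name, title, dept, research in zip(name_list, title_list, dept_list, research_list):
--         if name:
--             scholars.append({
--                 "name": name,
--                 "title": title or None,
--                 "department": dept or None,
--                 "research_area": research or None
--             })
--
--     return scholars
-- ===== SOURCE B (Python) =====
-- def parse_scholars(names, titles, departments, research_areas):
--     """Index-based: iterate the parsed name list once; pull the other fields by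
--     bounds-checked index instead of padding and zipping four lists."""
--     def lines(text):
--         return [s for s in (line.strip() for line in str(text).split('\n')) if s] if text else []
--     title_list = lines(titles)
--     dept_list = lines(departments)
--     research_list = lines(research_areas)
--     return [{
--         "name": name,
--         "title": title_list[i] if i < len(title_list) else None,
--         "department": dept_list[i] if i < len(dept_list) else None,
--         "research_area": research_list[i] if i < len(research_list) else None,
--     } for i, name in enumerate(lines(names))]
-- ===== Notes on version B (the rewrite author's own statement) =====
-- stated objective: simpler
-- what changed: B drops A's max-length computation and the four padding statements: instead of padding all four lists with '' and zipping, it walks the parsed name list once with enumerate and fetches title/department/research area by bounds-checked index, yielding None past the end.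
import Mathlib
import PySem

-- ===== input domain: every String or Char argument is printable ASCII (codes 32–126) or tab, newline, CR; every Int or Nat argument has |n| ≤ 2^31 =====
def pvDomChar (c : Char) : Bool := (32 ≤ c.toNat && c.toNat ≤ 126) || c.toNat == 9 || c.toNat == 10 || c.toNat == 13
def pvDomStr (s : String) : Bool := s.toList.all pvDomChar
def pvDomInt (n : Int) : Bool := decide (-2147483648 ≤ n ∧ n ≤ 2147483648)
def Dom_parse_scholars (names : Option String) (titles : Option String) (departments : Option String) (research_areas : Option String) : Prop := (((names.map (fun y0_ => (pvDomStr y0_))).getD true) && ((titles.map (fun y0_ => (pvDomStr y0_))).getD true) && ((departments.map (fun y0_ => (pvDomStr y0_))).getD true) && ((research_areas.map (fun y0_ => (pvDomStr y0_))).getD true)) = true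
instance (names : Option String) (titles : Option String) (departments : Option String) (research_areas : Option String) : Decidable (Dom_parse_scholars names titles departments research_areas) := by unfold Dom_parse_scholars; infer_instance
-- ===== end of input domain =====

-- B drops the max-length computation and the four padding statements: it walks the
-- parsed name list once and fetches the other fields by bounds-checked index (objective: simpler).

-- ===== PORT A =====
-- helper parse_multiline_field: '' / None -> []; else split on '\n', strip, keep non-empty
def parse_multiline_field (text : Option String) : List String :=
  match text with
  | none => []
  | some t =>
    if t = "" then []
    else (((PySem.Str.split? t "\n").getD []).filter (fun line => PySem.Str.strip line != "")).map
      (fun line => PySem.Str.strip line)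

-- zip over four lists, stopping at the shortest (Python zip)
def pvZip4 {α β γ δ : Type} : List α → List β → List γ → List δ → List (α × β × γ × δ)
  | a :: as, b :: bs, c :: cs, d :: ds => (a, b, c, d) :: pvZip4 as bs cs ds
  | _, _, _, _ => []

def parse_scholars (names : Option String) (titles : Option String) (departments : Option String) (research_areas : Option String) : List (List (String × Option String)) :=
  let name_list := parse_multiline_field names
  let title_list := parse_multiline_field titles
  let dept_list := parse_multiline_field departments
  let research_list := parse_multiline_field research_areas
  let max_len := max (max (max name_list.length title_list.length) dept_list.length) research_list.length
  let name_list := name_list ++ List.replicate (max_len - name_list.length) ""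
  let title_list := title_list ++ List.replicate (max_len - title_list.length) ""
  let dept_list := dept_list ++ List.replicate (max_len - dept_list.length) ""
  let research_list := research_list ++ List.replicate (max_len - research_list.length) ""
  (pvZip4 name_list title_list dept_list research_list).foldl
    (fun scholars r =>
      if r.1 ≠ "" then
        scholars ++ [[("name", some r.1),
                      ("title", if r.2.1 = "" then none else some r.2.1),
                      ("department", if r.2.2.1 = "" then none else some r.2.2.1),
                      ("research_area", if r.2.2.2 = "" then none else some r.2.2.2)]]
      else scholars) []

-- ===== PORT B =====
-- Source B's local 'lines': '' / None -> []; else map strip over the '\n'-split, keep non-empty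
def pvLinesB (text : Option String) : List String :=
  match text with
  | none => []
  | some t =>
    if t = "" then []
    else (((PySem.Str.split? t "\n").getD []).map (fun line => PySem.Str.strip line)).filter
      (fun s => s != "")

def parse_scholars_alt (names : Option String) (titles : Option String) (departments : Option String) (research_areas : Option String) : List (List (String × Option String)) :=
  let title_list := pvLinesB titles
  let dept_list := pvLinesB departments
  let research_list := pvLinesB research_areas
  (PySem.List.enumerate (pvLinesB names) 0).map (fun p =>
    [("name", some p.2),
     ("title", if p.1 < (title_list.length : Int) then some (title_list.getD p.1.toNat "") else none),
     ("department", if p.1 < (dept_list.length : Int) then some (dept_list.getD p.1.toNat "") else none),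
     ("research_area", if p.1 < (research_list.length : Int) then some (research_list.getD p.1.toNat "") else none)])

-- ===== PRECONDITION & SPEC =====
def Spec_parse_scholars (names : Option String) (titles : Option String) (departments : Option String) (research_areas : Option String) (out : List (List (String × Option String))) : Prop := out = parse_scholars_alt names titles departments research_areas
instance (names : Option String) (titles : Option String) (departments : Option String) (research_areas : Option String) (out : List (List (String × Option String))) : Decidable (Spec_parse_scholars names titles departments research_areas out) := by unfold Spec_parse_scholars; infer_instance

-- ===== CLAIM (what is proved, stated in full; the proofs are below) =====
def Claim_equal_parse_scholars : Prop := ∀ (names : Option String) (titles : Option String) (departments : Option String) (research_areas : Option String), Dom_parse_scholars names titles departments research_areas → Spec_parse_scholars names titles departments research_areas (parse_scholars names titles departments research_areas)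

-- ===== LEMMAS AND PROOFS =====

-- a scholar row
def pvRow (x : String) (ob oc od : Option String) : List (String × Option String) :=
  [("name", some x), ("title", ob), ("department", oc), ("research_area", od)]

-- recursive characterisation both ports are reduced to
def pvRec : List String → List String → List String → List String → List (List (String × Option String))
  | [], _, _, _ => []
  | x :: as, b, c, d => pvRow x b.head? c.head? d.head? :: pvRec as b.tail c.tail d.tail

def pvPad (l : List String) (m : Nat) : List String := l ++ List.replicate (m - l.length) ""

-- the body of A's loop
def pvStepA (scholars : List (List (String × Option String))) (r : String × String × String × String) : List (List (String × Option String)) :=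
  if r.1 ≠ "" then
    scholars ++ [[("name", some r.1),
                  ("title", if r.2.1 = "" then none else some r.2.1),
                  ("department", if r.2.2.1 = "" then none else some r.2.2.1),
                  ("research_area", if r.2.2.2 = "" then none else some r.2.2.2)]]
  else scholars

lemma pvPad_cons (l : List String) (m : Nat) :
    pvPad l (m + 1) = l.headD "" :: pvPad l.tail m := by
  cases l with
  | nil => simp [pvPad, List.replicate_succ]
  | cons x xs => simp [pvPad, Nat.succ_sub_succ]

lemma pmf_ne_empty (t : Option String) : ∀ x ∈ parse_multiline_field t, x ≠ "" := by
  intro x hx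
  cases t with
  | none => simp [parse_multiline_field] at hx
  | some s =>
    by_cases hs : s = "" <;> simp [parse_multiline_field, hs] at hx
    obtain ⟨line, ⟨_, hne⟩, rfl⟩ := hx
    exact hne

lemma linesB_eq_pmf (t : Option String) : pvLinesB t = parse_multiline_field t := by
  cases t with
  | none => rfl
  | some s =>
    by_cases hs : s = ""
    · simp [pvLinesB, parse_multiline_field, hs]
    · simp only [pvLinesB, parse_multiline_field, hs, if_false, List.filter_map]
      rfl

lemma acore (m : Nat) : ∀ (a b c d : List String) (acc : List (List (String × Option String))),
    (∀ x ∈ a, x ≠ "") → (∀ x ∈ b, x ≠ "") → (∀ x ∈ c, x ≠ "") → (∀ x ∈ d, x ≠ "") →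
    a.length ≤ m → b.length ≤ m → c.length ≤ m → d.length ≤ m →
    (pvZip4 (pvPad a m) (pvPad b m) (pvPad c m) (pvPad d m)).foldl pvStepA acc
    = acc ++ pvRec a b c d := by
  induction m with
  | zero =>
    intro a b c d acc _ _ _ _ ha hb hc hd
    rw [List.length_eq_zero_iff.mp (Nat.le_zero.mp ha),
        List.length_eq_zero_iff.mp (Nat.le_zero.mp hb),
        List.length_eq_zero_iff.mp (Nat.le_zero.mp hc),
        List.length_eq_zero_iff.mp (Nat.le_zero.mp hd)]
    simp [pvPad, pvZip4, pvRec]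
  | succ m ih =>
    intro a b c d acc hae hbe hce hde ha hb hc hd
    rw [pvPad_cons a, pvPad_cons b, pvPad_cons c, pvPad_cons d]
    cases a with
    | nil =>
      have hstep : pvStepA acc ("", b.headD "", c.headD "", d.headD "") = acc := by
        simp [pvStepA]
      simp only [List.headD_nil, List.tail_nil]
      rw [show pvZip4 ("" :: pvPad [] m) (b.headD "" :: pvPad b.tail m)
            (c.headD "" :: pvPad c.tail m) (d.headD "" :: pvPad d.tail m)
          = ("", b.headD "", c.headD "", d.headD "") ::
            pvZip4 (pvPad [] m) (pvPad b.tail m) (pvPad c.tail m) (pvPad d.tail m) from rfl,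
        List.foldl_cons, hstep,
        ih [] b.tail c.tail d.tail acc (by simp)
          (fun x hx => hbe x (List.mem_of_mem_tail hx))
          (fun x hx => hce x (List.mem_of_mem_tail hx))
          (fun x hx => hde x (List.mem_of_mem_tail hx))
          (by simp)
          (by simp [List.length_tail]; omega)
          (by simp [List.length_tail]; omega)
          (by simp [List.length_tail]; omega)]
      simp [pvRec]
    | cons x as =>
      have hx : x ≠ "" := hae x (by simp)
      have hb' : (if b.headD "" = "" then (none : Option String) else some (b.headD "")) = b.head? := by
        cases b with
        | nil => simp
        | cons y ys => simp [hbe y (by simp)]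
      have hc' : (if c.headD "" = "" then (none : Option String) else some (c.headD "")) = c.head? := by
        cases c with
        | nil => simp
        | cons y ys => simp [hce y (by simp)]
      have hd' : (if d.headD "" = "" then (none : Option String) else some (d.headD "")) = d.head? := by
        cases d with
        | nil => simp
        | cons y ys => simp [hde y (by simp)]
      have hstep : pvStepA acc (x, b.headD "", c.headD "", d.headD "")
          = acc ++ [pvRow x b.head? c.head? d.head?] := by
        unfold pvStepA
        rw [if_pos (show (x, b.headD "", c.headD "", d.headD "").1 ≠ "" from hx)]
        show acc ++ [[("name", some x),
          ("title", if b.headD "" = "" then none else some (b.headD "")),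
          ("department", if c.headD "" = "" then none else some (c.headD "")),
          ("research_area", if d.headD "" = "" then none else some (d.headD ""))]]
          = acc ++ [pvRow x b.head? c.head? d.head?]
        rw [hb', hc', hd']
        rfl
      simp only [List.headD_cons, List.tail_cons]
      rw [show pvZip4 (x :: pvPad as m) (b.headD "" :: pvPad b.tail m)
            (c.headD "" :: pvPad c.tail m) (d.headD "" :: pvPad d.tail m)
          = (x, b.headD "", c.headD "", d.headD "") ::
            pvZip4 (pvPad as m) (pvPad b.tail m) (pvPad c.tail m) (pvPad d.tail m) from rfl,
        List.foldl_cons, hstep,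
        ih as b.tail c.tail d.tail _
          (fun y hy => hae y (List.mem_cons_of_mem _ hy))
          (fun y hy => hbe y (List.mem_of_mem_tail hy))
          (fun y hy => hce y (List.mem_of_mem_tail hy))
          (fun y hy => hde y (List.mem_of_mem_tail hy))
          (by simpa using ha)
          (by simp [List.length_tail]; omega)
          (by simp [List.length_tail]; omega)
          (by simp [List.length_tail]; omega)]
      simp [pvRec]

lemma bcore (a : List String) : ∀ (s : Nat) (b c d : List String),
    (PySem.List.enumerate a (s : Int)).map (fun p =>
      [("name", some p.2),
       ("title", if p.1 < (b.length : Int) then some (b.getD p.1.toNat "") else none),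
       ("department", if p.1 < (c.length : Int) then some (c.getD p.1.toNat "") else none),
       ("research_area", if p.1 < (d.length : Int) then some (d.getD p.1.toNat "") else none)])
    = pvRec a (b.drop s) (c.drop s) (d.drop s) := by
  induction a with
  | nil => intro s b c d; simp [PySem.List.enumerate_nil, pvRec]
  | cons x as ih =>
    intro s b c d
    rw [PySem.List.enumerate_cons, List.map_cons]
    have hcast : ((s : Int) + 1) = ((s + 1 : Nat) : Int) := by push_cast; ring
    rw [hcast, ih (s + 1) b c d]
    have hget : ∀ (l : List String),
        (if ((s : Int), x).1 < (l.length : Int) then some (l.getD (((s : Int), x).1).toNat "") else none)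
        = (l.drop s).head? := by
      intro l
      rw [List.head?_drop]
      by_cases h : s < l.length
      · rw [if_pos (by show (s : Int) < (l.length : Int); exact_mod_cast h)]
        simp [List.getD, List.getElem?_eq_getElem h]
      · rw [if_neg (by show ¬ ((s : Int) < (l.length : Int)); omega), eq_comm]
        exact List.getElem?_eq_none_iff.mpr (by omega)
    rw [hget b, hget c, hget d]
    simp only [pvRec, pvRow, List.tail_drop]

-- ===== VERDICT (by name: the statement is the Claim_ definition above) =====
theorem parse_scholars_spec : Claim_equal_parse_scholars := by
  intro names titles departments research_areas _
  unfold Spec_parse_scholars parse_scholars parse_scholars_alt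
  simp only [linesB_eq_pmf]
  rw [show (0 : Int) = ((0 : Nat) : Int) from rfl, bcore]
  simp only [List.drop_zero]
  exact acore _ _ _ _ _ []
    (pmf_ne_empty names) (pmf_ne_empty titles) (pmf_ne_empty departments) (pmf_ne_empty research_areas)
    (by omega) (by omega) (by omega) (by omega) |>.trans (by simp)
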